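-- pv_equiv track=rewrite | github.com/jimezsa/parameter-golf-exp | experiments/013-ar-latent-diffusion/animate_progress.py | running_best
-- ===== SOURCE A (Python) =====
-- def running_best(points):
--     xs, ys = [], []
--     best = None
--     for p in points:
--         if best is None or p["metric"] < best:
--             best = p["metric"]
--         xs.append(p["x"])
--         ys.append(best)
--     return xs, ys
-- ===== SOURCE B (Python) =====
-- def _prefix_min(ms):
--     n = len(ms)
--     if n == 0:
--         return []
--     if n == 1:
--         return [ms[0]]
--     mid = n // 2
--     left = _prefix_min(ms[:mid])
--     right = _prefix_min(ms[mid:])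
--     b = left[-1]
--     return left + [b if b < r else r for r in right]
--
-- def running_best(points):
--     pts = list(points)
--     xs = [p["x"] for p in pts]
--     ms = [p["metric"] for p in pts]
--     return xs, _prefix_min(ms)
-- ===== Notes on version B (the rewrite author's own statement) =====
-- stated objective: alternative
-- what changed: Replaces A's fused left-to-right loop with an Option-sentinel accumulator by two extraction passes (xs, metrics) plus a divide-and-conquer prefix-minimum: split the metric list in half, recurse on each half, and min the right half's results with the left half's last (overall-minimum) value.
import Mathlib
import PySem

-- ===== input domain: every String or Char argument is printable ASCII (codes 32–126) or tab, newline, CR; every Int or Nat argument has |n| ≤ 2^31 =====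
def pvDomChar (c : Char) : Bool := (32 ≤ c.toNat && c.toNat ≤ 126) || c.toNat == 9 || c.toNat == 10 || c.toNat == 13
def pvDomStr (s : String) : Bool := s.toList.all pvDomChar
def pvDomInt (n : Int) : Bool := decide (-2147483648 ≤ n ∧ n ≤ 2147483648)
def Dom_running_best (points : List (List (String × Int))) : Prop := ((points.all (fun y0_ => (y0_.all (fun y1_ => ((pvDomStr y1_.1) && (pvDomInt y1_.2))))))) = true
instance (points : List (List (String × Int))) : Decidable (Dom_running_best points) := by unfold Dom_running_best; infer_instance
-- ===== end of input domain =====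

-- B computes the running minimum by divide-and-conquer instead of A's fused left-to-right
-- loop with an Option sentinel: extract xs and metrics, then prefix-min by splitting the
-- metric list in half, recursing, and min-ing the right half with the left half's last value.

-- ===== PORT A =====
-- p["k"] on the dict p (first-match lookup; Pre_ guarantees the key is present)
def pvKey (p : List (String × Int)) (k : String) : Int :=
  (PySem.Dict.mk p).getD k 0

def running_best (points : List (List (String × Int))) : List Int × List Int :=
  let st := points.foldl
    (fun (acc : List Int × List Int × Option Int) p =>
      let m := pvKey p "metric"
      let best : Int :=
        match acc.2.2 with
        | none => m
        | some b => if m < b then m else b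
      (acc.1 ++ [pvKey p "x"], acc.2.1 ++ [best], some best))
    ([], [], none)
  (st.1, st.2.1)

-- ===== PORT B =====
-- _prefix_min: divide-and-conquer prefix minimum (Source B); ms[:mid]/ms[mid:] via
-- PySem.List.slice; the Nat fuel (always ≥ length, so never exhausted) only makes the
-- recursion structural — it is not part of the algorithm.
def prefixMinAux : Nat → List Int → List Int
  | 0, _ => []
  | Nat.succ n, ms =>
      match ms with
      | [] => []
      | [m] => [m]
      | _ :: _ :: _ =>
          let mid := ms.length / 2
          let left := prefixMinAux n (PySem.List.slice ms none (some (mid : Int)))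
          let right := prefixMinAux n (PySem.List.slice ms (some (mid : Int)) none)
          let b := PySem.List.pyGetD left (-1) 0
          left ++ right.map (fun r => if b < r then b else r)

def prefixMin (ms : List Int) : List Int := prefixMinAux ms.length ms

def running_best_alt (points : List (List (String × Int))) : List Int × List Int :=
  let xs := points.map (fun p => pvKey p "x")
  let ms := points.map (fun p => pvKey p "metric")
  (xs, prefixMin ms)

-- ===== PRECONDITION & SPEC =====
-- A raises KeyError when a point lacks the key "metric" or "x"; exactly those inputs are excluded.
def Pre_running_best (points : List (List (String × Int))) : Prop :=
  ∀ p ∈ points, (PySem.Dict.mk p).contains "metric" = true ∧ (PySem.Dict.mk p).contains "x" = true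
instance (points : List (List (String × Int))) : Decidable (Pre_running_best points) := by unfold Pre_running_best; infer_instance
def pvWitness_running_best : (List (List (String × Int))) :=
  [[("x", 1), ("metric", 5)], [("x", 2), ("metric", 3)], [("x", 3), ("metric", 4)]]

def Spec_running_best (points : List (List (String × Int))) (out : List Int × List Int) : Prop := out = running_best_alt points
instance (points : List (List (String × Int))) (out : List Int × List Int) : Decidable (Spec_running_best points out) := by unfold Spec_running_best; infer_instance

-- ===== CLAIM (what is proved, stated in full; the proofs are below) =====
def Claim_equal_running_best : Prop := ∀ (points : List (List (String × Int))), Dom_running_best points → Pre_running_best points → Spec_running_best points (running_best points)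

-- ===== LEMMAS AND PROOFS =====

-- the prefix-min scan with seed b, and the prefix-min of a nonempty list
def scanMin (b : Int) : List Int → List Int
  | [] => []
  | m :: t => min b m :: scanMin (min b m) t

def pmSpec : List Int → List Int
  | [] => []
  | m :: t => m :: scanMin m t

@[simp] lemma if_lt_left_eq_min (m b : Int) : (if m < b then m else b) = min b m := by
  split_ifs <;> omega

@[simp] lemma if_lt_right_eq_min (b r : Int) : (if b < r then b else r) = min b r := by
  split_ifs <;> omega

lemma scanMin_append (l r : List Int) : ∀ b,
    scanMin b (l ++ r) = scanMin b l ++ scanMin (l.foldl min b) r := by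
  induction l with
  | nil => simp [scanMin]
  | cons m t ih => intro b; simp [scanMin, ih (min b m)]

lemma scanMin_min (t : List Int) : ∀ b m,
    scanMin (min b m) t = (scanMin m t).map (fun x => min b x) := by
  induction t with
  | nil => simp [scanMin]
  | cons a t' ih =>
      intro b m
      simp only [scanMin, List.map_cons, min_assoc]
      rw [ih b (min m a)]

lemma scanMin_eq_map (b m : Int) (t : List Int) :
    scanMin b (m :: t) = (pmSpec (m :: t)).map (fun x => min b x) := by
  simp [scanMin, pmSpec, scanMin_min]

lemma pmSpec_append (m : Int) (t r : List Int) :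
    pmSpec (m :: (t ++ r)) = pmSpec (m :: t) ++ (pmSpec r).map (fun x => min (t.foldl min m) x) := by
  cases r with
  | nil => simp [pmSpec]
  | cons m2 t2 =>
      simp only [pmSpec, List.cons_append, scanMin_append]
      rw [scanMin_eq_map]
      simp [pmSpec]

lemma getLast?_scanMin (t : List Int) : ∀ m, (m :: scanMin m t).getLast? = some (t.foldl min m) := by
  induction t with
  | nil => simp [scanMin]
  | cons a t' ih =>
      intro m
      simp only [scanMin, List.foldl_cons]
      rw [List.getLast?_cons_cons]
      exact ih (min m a)

lemma pyGetD_pmSpec_last (m : Int) (t : List Int) :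
    PySem.List.pyGetD (pmSpec (m :: t)) (-1) 0 = t.foldl min m := by
  have hne : pmSpec (m :: t) ≠ [] := by simp [pmSpec]
  rw [PySem.List.pyGetD_neg_one (h := hne)]
  have h2 := getLast?_scanMin t m
  have h3 := List.getLast?_eq_some_getLast (l := pmSpec (m :: t)) hne
  simp only [pmSpec] at h3
  rw [h3] at h2
  exact Option.some.inj h2

lemma prefixMin_eq_pmSpec_aux : ∀ (n : Nat) (ms : List Int), ms.length ≤ n → prefixMinAux n ms = pmSpec ms := by
  intro n
  induction n with
  | zero =>
      intro ms h
      have : ms = [] := by cases ms <;> simp_all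
      subst this; rfl
  | succ n ih =>
      intro ms hlen
      match ms with
      | [] => rfl
      | [m] => rfl
      | a :: c :: t =>
          show (let mid := (a :: c :: t).length / 2
                let left := prefixMinAux n (PySem.List.slice (a :: c :: t) none (some (mid : Int)))
                let right := prefixMinAux n (PySem.List.slice (a :: c :: t) (some (mid : Int)) none)
                let b := PySem.List.pyGetD left (-1) 0
                left ++ right.map (fun r => if b < r then b else r)) = pmSpec (a :: c :: t)
          simp only [PySem.List.slice_to_natCast, PySem.List.slice_from_natCast]
          simp only [List.length_cons] at hlen
          rw [ih ((a :: c :: t).take ((a :: c :: t).length / 2))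
                (by simp only [List.length_take, List.length_cons]; omega),
              ih ((a :: c :: t).drop ((a :: c :: t).length / 2))
                (by simp only [List.length_drop, List.length_cons]; omega)]
          obtain ⟨k, hk⟩ : ∃ k, (a :: c :: t).length / 2 = k + 1 :=
            ⟨(a :: c :: t).length / 2 - 1, by simp only [List.length_cons]; omega⟩
          have htake : (a :: c :: t).take ((a :: c :: t).length / 2) = a :: (c :: t).take k := by
            rw [hk, List.take_succ_cons]
          rw [htake, pyGetD_pmSpec_last]
          have hsplit : a :: c :: t
              = (a :: (c :: t).take k) ++ (a :: c :: t).drop ((a :: c :: t).length / 2) := by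
            rw [← htake, List.take_append_drop]
          conv_rhs => rw [hsplit, List.cons_append]
          rw [pmSpec_append]
          simp [min_comm]

lemma prefixMin_eq_pmSpec (ms : List Int) : prefixMin ms = pmSpec ms :=
  prefixMin_eq_pmSpec_aux ms.length ms le_rfl

lemma runA (pts : List (List (String × Int))) :
    ∀ (xsa ysa : List Int) (b : Int),
    pts.foldl
      (fun (acc : List Int × List Int × Option Int) p =>
        let m := pvKey p "metric"
        let best : Int :=
          match acc.2.2 with
          | none => m
          | some b => if m < b then m else b
        (acc.1 ++ [pvKey p "x"], acc.2.1 ++ [best], some best))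
      (xsa, ysa, some b)
    = (xsa ++ pts.map (fun p => pvKey p "x"),
       ysa ++ scanMin b (pts.map (fun p => pvKey p "metric")),
       some ((pts.map (fun p => pvKey p "metric")).foldl min b)) := by
  induction pts with
  | nil => simp [scanMin]
  | cons p t ih =>
      intro xsa ysa b
      simp only [List.foldl_cons, List.map_cons, scanMin, ih]
      simp

-- ===== VERDICT (by name: the statement is the Claim_ definition above) =====
theorem running_best_spec : Claim_equal_running_best := by
  intro points _ _
  unfold Spec_running_best running_best running_best_alt
  dsimp only
  rw [prefixMin_eq_pmSpec]
  cases points with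
  | nil => rfl
  | cons p rest =>
      simp only [List.foldl_cons, List.map_cons]
      rw [runA]
      simp [pmSpec]
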